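-- pv_equiv track=rewrite | github.com/SoloDoloTheSWag/reconforge | utils/helpers.py | group_by_tld
-- ===== SOURCE A (Python) =====
-- from typing import List, Dict, Optional, Union, Any, Set
--
-- def group_by_tld(domains: List[str]) -> Dict[str, List[str]]:
--     """Group domains by top-level domain"""
--     groups = {}
--
--     for domain in domains:
--         tld = domain.split('.')[-1]
--         if tld not in groups:
--             groups[tld] = []
--         groups[tld].append(domain)
--
--     return groups
-- ===== SOURCE B (Python) =====
-- def group_by_tld(domains):
--     """Group domains by top-level domain"""
--     def tld(d):
--         return d.split('.')[-1]
--     out = {}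
--     rest = domains
--     while rest:
--         t = tld(rest[0])
--         out[t] = [d for d in rest if tld(d) == t]
--         rest = [d for d in rest if tld(d) != t]
--     return out
-- ===== Notes on version B (the rewrite author's own statement) =====
-- stated objective: alternative
-- what changed: Replaces A's single-pass dict accumulation (per-element membership test and append into buckets) with an iterative partition: repeatedly take the first remaining domain's TLD, extract its whole group with one filter, and loop on the leftover list; no per-element dict lookups at all.
import Mathlib
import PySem

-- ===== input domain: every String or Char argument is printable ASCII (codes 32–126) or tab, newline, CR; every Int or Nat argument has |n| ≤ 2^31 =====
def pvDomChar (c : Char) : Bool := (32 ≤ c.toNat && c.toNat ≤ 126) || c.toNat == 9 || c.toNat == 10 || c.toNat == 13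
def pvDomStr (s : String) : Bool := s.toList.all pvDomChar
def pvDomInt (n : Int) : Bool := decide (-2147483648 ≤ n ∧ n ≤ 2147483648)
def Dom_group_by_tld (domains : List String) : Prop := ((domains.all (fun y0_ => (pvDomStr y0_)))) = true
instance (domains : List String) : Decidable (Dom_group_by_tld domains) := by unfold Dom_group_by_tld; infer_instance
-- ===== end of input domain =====

-- B replaces A's per-element dict accumulation by an iterative partition (peel off the
-- first remaining TLD's whole group with a filter, loop on the rest); same result, a
-- genuinely different traversal (not faster: O(n*k) vs O(n)).


-- ===== PORT A =====
-- domain.split('.')[-1]; '.' ≠ '' so split? is some, and a split result is never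
-- empty so pyGet? (-1) is some: both getD defaults are unreachable (exact port).
def group_by_tld (domains : List String) : List (String × List String) :=
  (domains.foldl
    (fun groups domain =>
      let tld := (PySem.List.pyGet? ((PySem.Str.split? domain ".").getD []) (-1)).getD ""
      let groups := if !(groups.contains tld) then groups.insert tld ([] : List String) else groups
      groups.modify tld [] (fun l => l ++ [domain]))
    PySem.Dict.empty).items

-- ===== PORT B =====
-- Source B's nested key function tld(d) = d.split('.')[-1] (same exactness note as above)
def tldKey (d : String) : String :=
  (PySem.List.pyGet? ((PySem.Str.split? d ".").getD []) (-1)).getD ""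

-- the while loop of Source B: out[t] is always a FRESH key (every later tld differs from
-- the peeled ones), so dict assignment is Dict.insert; rest[0] is the match head.
def altLoop (out : PySem.Dict String (List String)) (rest : List String) :
    PySem.Dict String (List String) :=
  match rest with
  | [] => out
  | r :: rs =>
    let t := tldKey r
    altLoop (out.insert t ((r :: rs).filter (fun d => tldKey d == t)))
            ((r :: rs).filter (fun d => !(tldKey d == t)))
termination_by rest.length
decreasing_by
  simp only [List.filter_cons, beq_self_eq_true, Bool.not_true, List.length_cons]
  exact Nat.lt_succ_of_le (List.length_filter_le _ _)

def group_by_tld_alt (domains : List String) : List (String × List String) :=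
  (altLoop PySem.Dict.empty domains).items

-- ===== PRECONDITION & SPEC =====
def Spec_group_by_tld (domains : List String) (out : List (String × List String)) : Prop := out = group_by_tld_alt domains
instance (domains : List String) (out : List (String × List String)) : Decidable (Spec_group_by_tld domains out) := by unfold Spec_group_by_tld; infer_instance

-- ===== CLAIM (what is proved, stated in full; the proofs are below) =====
def Claim_equal_group_by_tld : Prop := ∀ (domains : List String), Dom_group_by_tld domains → Spec_group_by_tld domains (group_by_tld domains)

-- ===== LEMMAS AND PROOFS =====

-- the canonical grouping table both sides compute: distinct tlds in first-occurrence
-- order, each with the sublist of domains having that tld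
def canon (rest : List String) : List (String × List String) :=
  (PySem.Set.ofList (rest.map tldKey)).map
    (fun t => (t, rest.filter (fun d => tldKey d == t)))

-- ---- A-side: the fold builds exactly `canon domains` ----

theorem groupStep_eq_modify (g : PySem.Dict String (List String)) (domain : String) :
    (let tld := (PySem.List.pyGet? ((PySem.Str.split? domain ".").getD []) (-1)).getD ""
     let g' := if !(g.contains tld) then g.insert tld ([] : List String) else g
     g'.modify tld [] (fun l => l ++ [domain]))
    = g.modify (tldKey domain) [] (fun l => l ++ [domain]) := by
  show (if !(g.contains (tldKey domain)) then g.insert (tldKey domain) [] else g).modify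
        (tldKey domain) [] (fun l => l ++ [domain]) = _
  by_cases h : g.contains (tldKey domain)
  · simp [h]
  · simp only [Bool.eq_false_iff.mpr h, Bool.not_false, if_pos]
    simp [PySem.Dict.modify, PySem.Dict.getD_insert_self, PySem.Dict.insert_insert_self,
      PySem.Dict.getD_of_not_contains _ _ (Bool.eq_false_iff.mpr h)]

theorem fill_loop_eq_pairs (domains : List String) (init : PySem.Dict String (List String)) :
    domains.foldl (fun b d => b.modify (tldKey d) [] (fun l => l ++ [d])) init
      = (domains.map (fun d => (tldKey d, d))).foldl
          (fun b p => b.modify p.1 [] (fun l => l ++ [p.2])) init := by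
  rw [List.foldl_map]

theorem keys_fill_loop (domains : List String) :
    (domains.foldl (fun b d => b.modify (tldKey d) [] (fun l => l ++ [d]))
      PySem.Dict.empty).keys = PySem.Set.ofList (domains.map tldKey) := by
  rw [fill_loop_eq_pairs]
  have h := PySem.Dict.keys_foldl_modify_key (domains.map (fun d => (tldKey d, d)))
    (fun p => p.1) ([] : List String) (fun _ p l => l ++ [p.2]) PySem.Dict.empty
  rw [show (domains.map (fun d => (tldKey d, d))).map (fun p => p.1) = domains.map tldKey by
    simp [List.map_map, Function.comp_def]] at h
  rw [h, PySem.Dict.keys_empty, PySem.Set.update_nil_left]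

theorem getD_fill_loop (domains : List String) (t : String) :
    (domains.foldl (fun b d => b.modify (tldKey d) [] (fun l => l ++ [d]))
      PySem.Dict.empty).getD t []
      = domains.filter (fun d => tldKey d == t) := by
  rw [fill_loop_eq_pairs, PySem.Dict.getD_foldl_modify_append, PySem.Dict.getD_empty,
    List.nil_append]
  simp [List.filter_map, List.map_map, Function.comp_def]

theorem A_eq_canon (domains : List String) : group_by_tld domains = canon domains := by
  have hA : group_by_tld domains
      = (domains.foldl (fun b d => b.modify (tldKey d) [] (fun l => l ++ [d]))
          PySem.Dict.empty).items := by
    unfold group_by_tld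
    congr 1
    apply List.foldl_ext
    intro g d _
    simpa using groupStep_eq_modify g d
  rw [hA, PySem.Dict.items_eq_map_keys _
    (by rw [keys_fill_loop]; exact PySem.Set.nodup_ofList _) []]
  rw [keys_fill_loop]
  exact List.map_congr_left fun t _ => by rw [getD_fill_loop]

-- ---- B-side: the partition loop also builds `canon domains` ----

theorem discard_eq_filter (s : List String) (x : String) :
    PySem.Set.discard s x = s.filter (fun y => !(y == x)) := rfl

theorem ofList_filter_ne (l : List String) (x : String) :
    PySem.Set.ofList (l.filter (fun y => !(y == x)))
      = (PySem.Set.ofList l).filter (fun y => !(y == x)) := by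
  induction l with
  | nil => rfl
  | cons a as ih =>
    by_cases h : a = x
    · subst h
      simp only [List.filter_cons, beq_self_eq_true, Bool.not_true,
        PySem.Set.ofList_cons, discard_eq_filter]
      simp only [if_neg (by simp : ¬ (false = true)), List.filter_filter]
      rw [ih]
      apply List.filter_congr; intro y _; simp
    · have hb : (!(a == x)) = true := by simp [h]
      simp only [List.filter_cons, hb, if_pos, PySem.Set.ofList_cons, ih,
        discard_eq_filter, List.filter_filter]
      congr 1
      apply List.filter_congr
      intro y _
      simp [Bool.and_comm]

theorem canon_cons (r : String) (rs : List String) :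
    canon (r :: rs)
      = (tldKey r, (r :: rs).filter (fun d => tldKey d == tldKey r))
          :: canon ((r :: rs).filter (fun d => !(tldKey d == tldKey r))) := by
  unfold canon
  have hmapf : ((r :: rs).filter (fun d => !(tldKey d == tldKey r))).map tldKey
      = ((r :: rs).map tldKey).filter (fun y => !(y == tldKey r)) := by
    rw [List.filter_map]; rfl
  rw [hmapf, List.map_cons, PySem.Set.ofList_cons, discard_eq_filter, ofList_filter_ne,
    PySem.Set.ofList_cons, discard_eq_filter]
  have hdrop : ((tldKey r :: (PySem.Set.ofList (rs.map tldKey)).filter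
        (fun y => !(y == tldKey r))).filter (fun y => !(y == tldKey r)))
      = (PySem.Set.ofList (rs.map tldKey)).filter (fun y => !(y == tldKey r)) := by
    rw [List.filter_cons]
    simp only [beq_self_eq_true, Bool.not_true, if_neg (by simp : ¬ (false = true)),
      List.filter_filter]
    apply List.filter_congr; intro y _; simp
  rw [hdrop, List.map_cons]
  congr 1
  apply List.map_congr_left
  intro t ht
  have htne : (t == tldKey r) = false := by
    have := (List.mem_filter.mp ht).2
    simpa using this
  congr 1
  rw [List.filter_filter]
  apply List.filter_congr
  intro d _
  cases hd : (tldKey d == t)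
  · simp
  · have : tldKey d = t := by simpa using hd
    simp [this, htne]

theorem altLoop_items (n : Nat) : ∀ (rest : List String), rest.length ≤ n →
    ∀ (out : PySem.Dict String (List String)),
    (∀ d ∈ rest, out.contains (tldKey d) = false) →
    (altLoop out rest).items = out.items ++ canon rest := by
  induction n with
  | zero =>
    intro rest hlen out _
    have : rest = [] := List.eq_nil_of_length_eq_zero (Nat.le_zero.mp hlen)
    subst this
    simp [altLoop, canon, PySem.Set.ofList_nil]
  | succ n ih =>
    intro rest hlen out hdis
    match rest with
    | [] => simp [altLoop, canon, PySem.Set.ofList_nil]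
    | r :: rs =>
      rw [altLoop]
      have hfl : ((r :: rs).filter (fun d => !(tldKey d == tldKey r))).length ≤ n := by
        have : ((r :: rs).filter (fun d => !(tldKey d == tldKey r))).length < (r :: rs).length := by
          simp only [List.filter_cons, beq_self_eq_true, Bool.not_true, List.length_cons]
          exact Nat.lt_succ_of_le (List.length_filter_le _ _)
        omega
      have hcr : out.contains (tldKey r) = false := hdis r (List.mem_cons_self ..)
      rw [ih _ hfl _ ?_, PySem.Dict.items_insert_of_not_contains _ _ hcr, canon_cons,
        List.append_assoc, List.singleton_append]
      intro d hd
      have hd' := List.mem_filter.mp hd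
      rw [PySem.Dict.contains_insert]
      have : (tldKey d == tldKey r) = false := by
        have := hd'.2; simpa using this
      rw [this, Bool.false_or]
      exact hdis d hd'.1

-- ===== VERDICT (by name: the statement is the Claim_ definition above) =====
theorem group_by_tld_spec : Claim_equal_group_by_tld := by
  intro domains _
  show group_by_tld domains = group_by_tld_alt domains
  rw [A_eq_canon]
  unfold group_by_tld_alt
  rw [altLoop_items domains.length domains (Nat.le_refl _) PySem.Dict.empty
    (fun d _ => PySem.Dict.contains_empty _)]
  rfl
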